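-- pv_equiv track=rewrite | github.com/Jasmetk0/fax | msa/services/draw.py | _build_seed_positions
-- ===== SOURCE A (Python) =====
-- from typing import Dict, List, Optional
--
-- def _build_seed_positions(size: int) -> List[int]:
--     """Return list mapping seed index -> slot for power-of-two size."""
--
--     if size == 1:
--         return [1]
--     prev = _build_seed_positions(size // 2)
--     result: List[int] = []
--     for p in prev:
--         result.append(p)
--         result.append(size + 1 - p)
--     return result
-- ===== SOURCE B (Python) =====
-- from typing import Dict, List, Optional
--
-- def _build_seed_positions(size: int) -> List[int]:
--     """Return list mapping seed index -> slot for power-of-two size."""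
--     sizes: List[int] = []
--     s = size
--     while s > 1:
--         sizes.append(s)
--         s //= 2
--     result: List[int] = [1]
--     for s in reversed(sizes):
--         result = [x for p in result for x in (p, s + 1 - p)]
--     return result
-- ===== Notes on version B (the rewrite author's own statement) =====
-- stated objective: alternative
-- what changed: Replaces the top-down recursion by an explicit bottom-up loop: first collect the chain of level sizes via repeated floor-halving, then expand the seed list level by level from [1] upward.
import Mathlib
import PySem

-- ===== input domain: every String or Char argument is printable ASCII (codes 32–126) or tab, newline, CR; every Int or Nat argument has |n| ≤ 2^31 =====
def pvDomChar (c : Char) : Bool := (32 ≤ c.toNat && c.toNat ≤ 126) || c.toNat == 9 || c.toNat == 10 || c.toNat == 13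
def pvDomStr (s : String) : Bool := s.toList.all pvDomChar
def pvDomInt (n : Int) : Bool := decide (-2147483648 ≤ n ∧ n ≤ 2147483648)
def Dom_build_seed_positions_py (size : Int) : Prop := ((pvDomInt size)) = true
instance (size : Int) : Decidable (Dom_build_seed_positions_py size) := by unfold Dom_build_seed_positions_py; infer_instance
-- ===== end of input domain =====

-- B replaces A's top-down recursion by an explicit bottom-up loop over the chain of
-- floor-halved level sizes (alternative decomposition; equal cost).


-- ===== PORT A =====
-- Python A diverges (RecursionError) for size ≤ 0; those inputs are outside Pre_ and the
-- port returns [] there so it is total.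
def build_seed_positions_py (size : Int) : List Int :=
  if size = 1 then [1]
  else if h : 1 < size then
    let prev := build_seed_positions_py (PySem.Int.floordiv size 2)
    prev.foldl (fun result p => (result ++ [p]) ++ [size + 1 - p]) []
  else []
termination_by size.toNat
decreasing_by
  have h2 : PySem.Int.floordiv size 2 = size / 2 := PySem.Int.floordiv_eq_ediv_of_pos (by omega)
  rw [h2]; omega

-- ===== PORT B =====
-- the while loop 'while s > 1: sizes.append(s); s //= 2' (sizes in append order)
def pvSizesChain (s : Int) : List Int :=
  if h : 1 < s then s :: pvSizesChain (PySem.Int.floordiv s 2) else []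
termination_by s.toNat
decreasing_by
  have h2 : PySem.Int.floordiv s 2 = s / 2 := PySem.Int.floordiv_eq_ediv_of_pos (by omega)
  rw [h2]; omega

def build_seed_positions_py_alt (size : Int) : List Int :=
  (pvSizesChain size).reverse.foldl
    (fun result s => result.flatMap (fun p => [p, s + 1 - p])) [1]

-- ===== PRECONDITION & SPEC =====
-- Python A recurses forever (RecursionError) when size ≤ 0: those inputs are excluded.
def Pre_build_seed_positions_py (size : Int) : Prop := 1 ≤ size
instance (size : Int) : Decidable (Pre_build_seed_positions_py size) := by unfold Pre_build_seed_positions_py; infer_instance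
def pvWitness_build_seed_positions_py : Int := (8)

def Spec_build_seed_positions_py (size : Int) (out : List Int) : Prop := out = build_seed_positions_py_alt size
instance (size : Int) (out : List Int) : Decidable (Spec_build_seed_positions_py size out) := by unfold Spec_build_seed_positions_py; infer_instance

-- ===== CLAIM (what is proved, stated in full; the proofs are below) =====
def Claim_equal_build_seed_positions_py : Prop := ∀ (size : Int), Dom_build_seed_positions_py size → Pre_build_seed_positions_py size → Spec_build_seed_positions_py size (build_seed_positions_py size)

-- ===== LEMMAS AND PROOFS =====

-- A's loop body 'result.append(p); result.append(size+1-p)' as a flatMap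
theorem loopA_eq_flatMap (s : Int) (l acc : List Int) :
    l.foldl (fun result p => (result ++ [p]) ++ [s + 1 - p]) acc
      = acc ++ l.flatMap (fun p => [p, s + 1 - p]) := by
  have hfun : (fun (result : List Int) p => (result ++ [p]) ++ [s + 1 - p])
      = fun result p => result ++ [p, s + 1 - p] := by
    funext r p; simp
  rw [hfun, PySem.List.foldl_append_eq_flatMap]

theorem eq_of_pos : ∀ (n : Nat) (size : Int), size.toNat = n → 1 ≤ size →
    build_seed_positions_py size = build_seed_positions_py_alt size := by
  intro n
  induction n using Nat.strong_induction_on with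
  | _ n ih =>
    intro size hn hpos
    by_cases h1 : size = 1
    · subst h1
      simp [build_seed_positions_py, build_seed_positions_py_alt, pvSizesChain]
    · have h2 : 1 < size := by omega
      have hfd : PySem.Int.floordiv size 2 = size / 2 :=
        PySem.Int.floordiv_eq_ediv_of_pos (by omega)
      have hlt : (PySem.Int.floordiv size 2).toNat < n := by rw [hfd]; omega
      have hpos' : 1 ≤ PySem.Int.floordiv size 2 := by rw [hfd]; omega
      have IH := ih _ hlt (PySem.Int.floordiv size 2) rfl hpos'
      rw [build_seed_positions_py]
      simp only [h1, if_false, dif_pos h2]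
      rw [loopA_eq_flatMap, IH]
      conv_rhs => rw [build_seed_positions_py_alt, pvSizesChain]
      simp only [dif_pos h2, List.reverse_cons, List.foldl_append]
      rfl

-- ===== VERDICT (by name: the statement is the Claim_ definition above) =====
theorem build_seed_positions_py_spec : Claim_equal_build_seed_positions_py := by
  intro size _ hpre
  exact eq_of_pos size.toNat size rfl hpre
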